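-- pv_equiv track=rewrite | github.com/nriddiford/svParser | script/svStitch.py | join_same_end
-- ===== SOURCE A (Python) =====
-- def join_same_end(d, window, complex_events):
--     seen = []
--     for c in sorted(d.keys()):
--         for b1 in sorted(d[c].keys()):
--             seen.append(b1)
--             first_event = d[c][b1][0][0]
--             for i, var in enumerate(sorted(d[c][b1])):
--                 # if first_event == var[0]: continue
--                 # complex_events.setdefault(first_event, []).extend([first_event, var[0]])
--                 for j in range(b1 - window, b1 + window):
--                     if j in d[c] and j not in seen:
--                         complex_events.setdefault(first_event, []).extend([first_event, d[c][j][0][0]])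
--
--     return complex_events
-- ===== SOURCE B (Python) =====
-- def join_same_end(d, window, complex_events):
--     # Mutates complex_events in place, like the original.
--     # Different algorithm: exploit that breakpoints are processed in sorted order,
--     # so a breakpoint j of the same chromosome is "unseen" at b1 exactly when j > b1
--     # and j was not a key of an earlier chromosome.  So instead of scanning every
--     # integer position in the window, walk forward along the sorted key list from b1
--     # until the key leaves the window (two-pointer / neighbour scan).
--     prev = set()           # keys of chromosomes already fully processed
--     for c in sorted(d):
--         chrom = d[c]
--         ks = sorted(chrom)
--         for i, b1 in enumerate(ks):
--             first_event = chrom[b1][0][0]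
--             pairs = []
--             t = i + 1
--             while t < len(ks) and ks[t] < b1 + window:
--                 j = ks[t]
--                 if j not in prev:
--                     pairs.append(first_event)
--                     pairs.append(chrom[j][0][0])
--                 t += 1
--             if pairs:
--                 complex_events.setdefault(first_event, []).extend(len(chrom[b1]) * pairs)
--         prev.update(ks)
--     return complex_events
-- ===== Notes on version B (the rewrite author's own statement) =====
-- stated objective: faster
-- what changed: B drops A's scan over every integer position of the window: since breakpoints are processed in sorted order, the unseen window partners of b1 are exactly the keys following b1 in the sorted key list up to b1+window (minus keys of earlier chromosomes, kept in a set), so B walks forward along the sorted key list with an early stop at the window edge, collects the pair list once, and emits it len(d[c][b1]) times, instead of A's per-variant re-sort plus full-window membership scan with a linear 'seen' list search.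
import Mathlib
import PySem

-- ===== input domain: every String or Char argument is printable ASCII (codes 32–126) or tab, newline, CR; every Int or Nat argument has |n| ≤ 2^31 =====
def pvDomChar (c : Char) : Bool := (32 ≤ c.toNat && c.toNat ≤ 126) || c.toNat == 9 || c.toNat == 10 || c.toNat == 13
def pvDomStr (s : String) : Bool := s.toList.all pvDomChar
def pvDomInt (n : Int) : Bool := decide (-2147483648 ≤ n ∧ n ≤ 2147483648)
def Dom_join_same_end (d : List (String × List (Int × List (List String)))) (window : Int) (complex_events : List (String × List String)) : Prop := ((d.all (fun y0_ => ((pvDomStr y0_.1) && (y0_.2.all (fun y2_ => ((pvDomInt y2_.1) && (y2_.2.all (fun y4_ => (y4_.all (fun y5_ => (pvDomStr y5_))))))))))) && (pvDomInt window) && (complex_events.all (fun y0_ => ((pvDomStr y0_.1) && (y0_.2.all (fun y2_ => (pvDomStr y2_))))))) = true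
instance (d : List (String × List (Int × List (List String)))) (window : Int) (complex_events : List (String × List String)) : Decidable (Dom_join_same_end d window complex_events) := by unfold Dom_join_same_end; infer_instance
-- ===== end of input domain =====

-- B replaces A's per-variant integer scan of the whole window (with a linear list search for 'seen')
-- by a neighbour walk along the sorted breakpoint list: in sorted order the unseen window partners of
-- b1 are exactly the following keys below b1+window that were not keys of an earlier chromosome, so B
-- scans forward from b1 and stops at the window edge. Both A and B mutate complex_events in place;
-- the equivalence proved here is about the return value.


-- ===== PORT A =====
-- the body of A's loop over sorted(d[c].keys()); state = (seen, complex_events)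
def jseA_step (chrom : PySem.Dict Int (List (List String))) (window : Int)
    (st : List Int × PySem.Dict String (List String)) (b1 : Int) :
    List Int × PySem.Dict String (List String) :=
  let seen := st.1 ++ [b1]                                    -- seen.append(b1)
  let vs := chrom.getD b1 []                                  -- d[c][b1]  (b1 is a key; default unused)
  let first_event := (vs.headD []).headD ""                   -- d[c][b1][0][0]  (in range under Pre_)
  let ce := (PySem.List.enumerate (PySem.List.sorted vs (fun x => x) false) 0).foldl
    (fun ce _ =>                                              -- for i, var in enumerate(sorted(d[c][b1]))
      (PySem.List.pyRange (b1 - window) (b1 + window) 1).foldl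
        (fun ce j =>                                          -- for j in range(b1 - window, b1 + window)
          if chrom.contains j && !(seen.contains j) then      -- if j in d[c] and j not in seen
            -- complex_events.setdefault(first_event, []).extend([first_event, d[c][j][0][0]])
            ce.insert first_event (ce.getD first_event [] ++
              [first_event, ((chrom.getD j []).headD []).headD ""])
          else ce) ce) st.2
  (seen, ce)

def join_same_end (d : List (String × List (Int × List (List String)))) (window : Int) (complex_events : List (String × List String)) : List (String × List String) :=
  let dd := PySem.Dict.mk d
  ((PySem.List.sorted dd.keys (fun x => x) false).foldl       -- for c in sorted(d.keys())
    (fun st c =>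
      let chrom := PySem.Dict.mk (dd.getD c [])               -- d[c]  (c is a key; default unused)
      (PySem.List.sorted chrom.keys (fun x => x) false).foldl -- for b1 in sorted(d[c].keys())
        (jseA_step chrom window) st)
    (([] : List Int), PySem.Dict.mk complex_events)).2.items

-- ===== PORT B =====
-- B's inner while loop: walk forward along the sorted key list while the key is below b1+window,
-- collecting the flat [first_event, event] pairs for keys not seen in an earlier chromosome
def jseB_scan (chrom : PySem.Dict Int (List (List String))) (prev : PySem.Set Int)
    (hi : Int) (fe : String) : List Int → List String
  | [] => []
  | j :: rest =>
    if j < hi then                                            -- while t < len(ks) and ks[t] < b1 + window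
      if !(PySem.Set.contains prev j) then                    -- if j not in prev
        fe :: ((chrom.getD j []).headD []).headD "" :: jseB_scan chrom prev hi fe rest
      else jseB_scan chrom prev hi fe rest
    else []

-- B's loop over enumerate(ks): at b1 the tail of ks is exactly ks[i+1:], so recurse on the list
def jseB_chromLoop (chrom : PySem.Dict Int (List (List String))) (prev : PySem.Set Int)
    (window : Int) : List Int → PySem.Dict String (List String) → PySem.Dict String (List String)
  | [], ce => ce
  | b1 :: rest, ce =>
    let fe := ((chrom.getD b1 []).headD []).headD ""          -- chrom[b1][0][0]
    let pairs := jseB_scan chrom prev (b1 + window) fe rest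
    let ce' := if pairs.isEmpty then ce                       -- if pairs:
      else ce.insert fe (ce.getD fe [] ++                     -- setdefault(...).extend(len(chrom[b1]) * pairs)
        (List.replicate (chrom.getD b1 []).length pairs).flatten)
    jseB_chromLoop chrom prev window rest ce'

def join_same_end_alt (d : List (String × List (Int × List (List String)))) (window : Int) (complex_events : List (String × List String)) : List (String × List String) :=
  let dd := PySem.Dict.mk d
  ((PySem.List.sorted dd.keys (fun x => x) false).foldl       -- for c in sorted(d)
    (fun (st : PySem.Set Int × PySem.Dict String (List String)) c =>
      let chrom := PySem.Dict.mk (dd.getD c [])               -- chrom = d[c]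
      let ks := PySem.List.sorted chrom.keys (fun x => x) false   -- ks = sorted(chrom)
      (PySem.Set.update st.1 ks,                              -- prev.update(ks)  (after the inner loop)
       jseB_chromLoop chrom st.1 window ks st.2))
    ((PySem.Set.empty : PySem.Set Int), PySem.Dict.mk complex_events)).2.items

-- ===== PRECONDITION & SPEC =====
-- Pre_ excludes (a) inputs where Python A raises IndexError: some event list d[c][b1] or its first
-- element is empty (A evaluates d[c][b1][0][0] for every key); (b) association lists with duplicate
-- keys (outer, inner, or in complex_events), unrepresentable in a Python dict, on which the
-- first-match assoc-list convention and Python's last-value dict construction are both accidental.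
def Pre_join_same_end (d : List (String × List (Int × List (List String)))) (window : Int) (complex_events : List (String × List String)) : Prop :=
  (d.map Prod.fst).Nodup ∧ (complex_events.map Prod.fst).Nodup ∧
  ∀ p ∈ d, (p.2.map Prod.fst).Nodup ∧ ∀ q ∈ p.2, q.2 ≠ [] ∧ q.2.headD [] ≠ []
instance (d : List (String × List (Int × List (List String)))) (window : Int) (complex_events : List (String × List String)) : Decidable (Pre_join_same_end d window complex_events) := by unfold Pre_join_same_end; infer_instance

def pvWitness_join_same_end : (List (String × List (Int × List (List String)))) × Int × (List (String × List String)) :=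
  ([("1", [(5, [["del", "a"]]), (7, [["dup"]])])], 10, [("x", ["y"])])

def Spec_join_same_end (d : List (String × List (Int × List (List String)))) (window : Int) (complex_events : List (String × List String)) (out : List (String × List String)) : Prop := out = join_same_end_alt d window complex_events
instance (d : List (String × List (Int × List (List String)))) (window : Int) (complex_events : List (String × List String)) (out : List (String × List String)) : Decidable (Spec_join_same_end d window complex_events out) := by unfold Spec_join_same_end; infer_instance

-- ===== CLAIM (what is proved, stated in full; the proofs are below) =====
def Claim_equal_join_same_end : Prop := ∀ (d : List (String × List (Int × List (List String)))) (window : Int) (complex_events : List (String × List String)), Dom_join_same_end d window complex_events → Pre_join_same_end d window complex_events → Spec_join_same_end d window complex_events (join_same_end d window complex_events)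

-- ===== LEMMAS AND PROOFS =====

-- a foldl whose body ignores the element is an iterate
theorem jse_foldl_const {α β : Type} (l : List α) (g : β → β) (b : β) :
    l.foldl (fun x _ => g x) b = g^[l.length] b := by
  induction l generalizing b with
  | nil => rfl
  | cons x xs ih => simp [List.foldl_cons, ih, Function.iterate_succ_apply]

-- repeated setdefault/extend over a list of events collapses to one insert
theorem jse_extend_fold {κ : Type} [BEq κ] [LawfulBEq κ] (fe : κ) (evs : List κ)
    (ce : PySem.Dict κ (List κ)) (hne : evs ≠ []) :
    evs.foldl (fun ce e => ce.insert fe (ce.getD fe [] ++ [fe, e])) ce =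
      ce.insert fe (ce.getD fe [] ++ evs.flatMap (fun e => [fe, e])) := by
  obtain ⟨x, xs, rfl⟩ := List.exists_cons_of_ne_nil hne
  clear hne
  induction xs generalizing x ce with
  | nil => simp
  | cons y ys ih =>
    rw [List.foldl_cons, ih]
    rw [PySem.Dict.getD_insert_self, PySem.Dict.insert_insert_self]
    simp [List.append_assoc]

-- iterating the collapsed insert n times
theorem jse_extend_iter {κ : Type} [BEq κ] [LawfulBEq κ] (fe : κ) (E : List κ)
    (ce : PySem.Dict κ (List κ)) (n : ℕ) :
    (fun ce => PySem.Dict.insert ce fe (PySem.Dict.getD ce fe [] ++ E))^[n + 1] ce =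
      ce.insert fe (ce.getD fe [] ++ (List.replicate (n + 1) E).flatten) := by
  induction n generalizing ce with
  | zero => simp
  | succ m ih =>
    have hcomm : ∀ j : ℕ, (List.replicate j E).flatten ++ E = E ++ (List.replicate j E).flatten := by
      intro j
      induction j with
      | zero => simp
      | succ i ihj => simp [List.replicate_succ, List.append_assoc, ihj]
    rw [Function.iterate_succ_apply', ih, PySem.Dict.getD_insert_self, PySem.Dict.insert_insert_self]
    simp [List.replicate_succ, List.append_assoc, hcomm]

-- A's iterated window pass, fully collapsed (ev = event list, n = number of variants)
theorem jse_core (fe : String) (ev : List String) (n : ℕ) (ce : PySem.Dict String (List String)) :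
    (fun ce => ev.foldl (fun ce e => ce.insert fe (ce.getD fe [] ++ [fe, e])) ce)^[n] ce =
    (if ((List.replicate n (ev.flatMap (fun e => [fe, e]))).flatten).isEmpty then ce
     else ce.insert fe (ce.getD fe [] ++ (List.replicate n (ev.flatMap (fun e => [fe, e]))).flatten)) := by
  rcases ev with _ | ⟨e, es⟩
  · have h1 : (fun ce : PySem.Dict String (List String) =>
        List.foldl (fun ce e => ce.insert fe (ce.getD fe [] ++ [fe, e])) ce []) = id := rfl
    have h2 : ∀ m : ℕ, (List.replicate m (([] : List String).flatMap (fun e => [fe, e]))).flatten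
        = ([] : List String) := by
      intro m
      induction m with
      | zero => rfl
      | succ i _ => simp [List.replicate_succ]
    rw [h1, Function.iterate_id]
    simp
  · have hq : (fun ce : PySem.Dict String (List String) =>
        (e :: es).foldl (fun ce e => ce.insert fe (ce.getD fe [] ++ [fe, e])) ce)
        = fun ce => ce.insert fe (ce.getD fe [] ++ (e :: es).flatMap (fun e => [fe, e])) := by
      funext ce
      exact jse_extend_fold fe (e :: es) ce (by simp)
    rcases n with _ | m
    · simp
    · rw [hq, jse_extend_iter]
      have hne : ¬ ((List.replicate (m + 1) ((e :: es).flatMap (fun e => [fe, e]))).flatten).isEmpty = true := by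
        simp [List.replicate_succ]
      rw [if_neg hne]

-- a guarded foldl is a foldl over the filtered list
theorem jse_foldl_ite {α β : Type} (l : List α) (P : α → Bool) (q : β → α → β) (b : β) :
    l.foldl (fun x j => if P j then q x j else x) b = (l.filter P).foldl q b := by
  induction l generalizing b with
  | nil => rfl
  | cons x xs ih => by_cases h : P x <;> simp [h, ih]

-- A's step, second component, collapsed to one conditional insert over its filtered window list
theorem jseA_step_snd (chrom : PySem.Dict Int (List (List String))) (window : Int)
    (sA : List Int) (ce : PySem.Dict String (List String)) (b1 : Int) :
    (jseA_step chrom window (sA, ce) b1).2 =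
    (let fe := ((chrom.getD b1 []).headD []).headD ""
     let E := (List.replicate (chrom.getD b1 []).length
        ((((PySem.List.pyRange (b1 - window) (b1 + window) 1).filter
            (fun j => chrom.contains j && !((sA ++ [b1]).contains j))).map
            (fun j => ((chrom.getD j []).headD []).headD "")).flatMap (fun e => [fe, e]))).flatten
     if E.isEmpty then ce else ce.insert fe (ce.getD fe [] ++ E)) := by
  unfold jseA_step
  dsimp only
  have hg : (fun ce : PySem.Dict String (List String) =>
      (PySem.List.pyRange (b1 - window) (b1 + window) 1).foldl
        (fun ce j => if chrom.contains j && !((sA ++ [b1]).contains j) then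
            ce.insert ((((chrom.getD b1 []).headD []).headD ""))
              (ce.getD ((((chrom.getD b1 []).headD []).headD "")) [] ++
               [(((chrom.getD b1 []).headD []).headD ""), ((chrom.getD j []).headD []).headD ""]) else ce) ce)
      = (fun ce => (((PySem.List.pyRange (b1 - window) (b1 + window) 1).filter
            (fun j => chrom.contains j && !((sA ++ [b1]).contains j))).map
            (fun j => ((chrom.getD j []).headD []).headD "")).foldl
          (fun ce e => ce.insert ((((chrom.getD b1 []).headD []).headD ""))
            (ce.getD ((((chrom.getD b1 []).headD []).headD "")) [] ++
             [(((chrom.getD b1 []).headD []).headD ""), e])) ce) := by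
    funext ce
    rw [jse_foldl_ite, List.foldl_map]
  rw [jse_foldl_const, PySem.List.length_enumerate, PySem.List.length_sorted, hg, jse_core]


-- two strictly increasing Int lists with the same members are equal
theorem jse_eq_of_mem_iff (l1 l2 : List Int) (h1 : l1.Pairwise (· < ·)) (h2 : l2.Pairwise (· < ·))
    (hm : ∀ x, x ∈ l1 ↔ x ∈ l2) : l1 = l2 := by
  have n1 : l1.Nodup := h1.imp (fun h => ne_of_lt h)
  have n2 : l2.Nodup := h2.imp (fun h => ne_of_lt h)
  have hp : l2.Perm l1 := (List.perm_ext_iff_of_nodup n2 n1).mpr (fun x => (hm x).symm)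
  calc l1 = PySem.List.sorted l1 (fun x => x) false :=
        (PySem.List.sorted_eq_of_perm_of_pairwise_lt l1 l1 (fun x => x) (List.Perm.refl l1) h1).symm
    _ = l2 := PySem.List.sorted_eq_of_perm_of_pairwise_lt l1 l2 (fun x => x) hp h2

-- ≤-pairwise + nodup → <-pairwise

theorem jse_pairwise_lt (l : List Int) (hle : l.Pairwise (· ≤ ·)) (hnd : l.Nodup) :
    l.Pairwise (· < ·) :=
  (hle.and hnd).imp (fun h => lt_of_le_of_ne h.1 h.2)

theorem jse_flatten_replicate_isEmpty {α : Type} (n : ℕ) (hn : 1 ≤ n) (l : List α) :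
    ((List.replicate n l).flatten).isEmpty = l.isEmpty := by
  obtain ⟨m, rfl⟩ := Nat.exists_eq_add_of_le hn
  cases l with
  | nil =>
    have h : ∀ k : ℕ, (List.replicate k ([] : List α)).flatten = [] := by
      intro k; induction k with
      | zero => rfl
      | succ i ih => simp [List.replicate_succ, ih]
    simp [h]
  | cons x xs => simp [Nat.add_comm 1 m, List.replicate_succ]

-- the forward scan is the filter over the (sorted) tail
theorem jseB_scan_eq (chrom : PySem.Dict Int (List (List String))) (prev : PySem.Set Int)
    (hi : Int) (fe : String) (rest : List Int) (hs : rest.Pairwise (· < ·)) :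
    jseB_scan chrom prev hi fe rest =
      (rest.filter (fun j => decide (j < hi) && !(PySem.Set.contains prev j))).flatMap
        (fun j => [fe, ((chrom.getD j []).headD []).headD ""]) := by
  induction rest with
  | nil => rfl
  | cons j rest ih =>
    rw [List.pairwise_cons] at hs
    by_cases hj : j < hi
    · by_cases hp : j ∈ prev
      · simp [jseB_scan, hj, hp, ih hs.2]
      · simp [jseB_scan, hj, hp, ih hs.2]
    · simp [jseB_scan, hj]
      intro x hx hlt
      have hjx : j < x := hs.1 x hx
      exact absurd hlt (by omega)

-- A's filtered window list IS the filtered sorted tail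

theorem jse_filter_eq (chrom : PySem.Dict Int (List (List String))) (prev : PySem.Set Int)
    (window b1 : Int) (pre0 rest sA : List Int)
    (hpw : (pre0 ++ b1 :: rest).Pairwise (· < ·))
    (hck : ∀ x : Int, chrom.contains x = true ↔ x ∈ pre0 ++ b1 :: rest)
    (hsA : ∀ x : Int, x ∈ sA ↔ x ∈ prev ∨ x ∈ pre0) :
    (PySem.List.pyRange (b1 - window) (b1 + window) 1).filter
        (fun j => chrom.contains j && !((sA ++ [b1]).contains j)) =
      rest.filter (fun j => decide (j < b1 + window) && !(PySem.Set.contains prev j)) := by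
  have hsplit := (List.pairwise_append.mp hpw)
  have hb1rest := List.pairwise_cons.mp hsplit.2.1
  have hpre : ∀ p ∈ pre0, ∀ y ∈ b1 :: rest, p < y := hsplit.2.2
  apply jse_eq_of_mem_iff
  · exact List.Pairwise.filter _ (PySem.List.pairwise_lt_pyRange_one _ _)
  · exact List.Pairwise.filter _ hb1rest.2
  · intro x
    simp only [List.mem_filter, PySem.List.mem_pyRange_one, Bool.and_eq_true, Bool.not_eq_true',
      List.contains_eq_mem, decide_eq_false_iff_not, List.mem_append, List.mem_singleton,
      decide_eq_true_eq, PySem.Set.contains_eq_listContains]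
    constructor
    · rintro ⟨⟨hlo, hhi⟩, hcx, hns⟩
      push Not at hns
      have hxfull : x ∈ pre0 ++ b1 :: rest := (hck x).mp hcx
      have hxrest : x ∈ rest := by
        rcases List.mem_append.mp hxfull with hp | hc
        · exact absurd ((hsA x).mpr (Or.inr hp)) hns.1
        · rcases List.mem_cons.mp hc with rfl | hr
          · exact absurd rfl hns.2
          · exact hr
      refine ⟨hxrest, hhi, fun hxp => hns.1 ((hsA x).mpr (Or.inl hxp))⟩
    · rintro ⟨hxrest, hhi, hnp⟩
      have hb1x : b1 < x := hb1rest.1 x hxrest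
      refine ⟨⟨by omega, hhi⟩, (hck x).mpr (by simp [hxrest]), ?_⟩
      push Not
      refine ⟨fun hxs => ?_, by omega⟩
      rcases (hsA x).mp hxs with hp | hp
      · exact hnp hp
      · exact absurd (hpre x hp b1 (by simp)) (by omega)

-- seen after A's inner fold is the start list plus the processed keys, in order
theorem jseA_foldl_fst (chrom : PySem.Dict Int (List (List String))) (window : Int)
    (ks : List Int) (sA : List Int) (ce : PySem.Dict String (List String)) :
    (ks.foldl (jseA_step chrom window) (sA, ce)).1 = sA ++ ks := by
  induction ks generalizing sA ce with
  | nil => simp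
  | cons b1 rest ih =>
    rw [List.foldl_cons,
      show jseA_step chrom window (sA, ce) b1
        = (sA ++ [b1], (jseA_step chrom window (sA, ce) b1).2) from rfl, ih]
    simp

-- the inner loops agree: A's fold over the remaining sorted keys vs B's neighbour walk
theorem jse_inner (chrom : PySem.Dict Int (List (List String))) (window : Int)
    (prev : PySem.Set Int) :
    ∀ (ks' pre0 sA : List Int) (ce : PySem.Dict String (List String)),
    (pre0 ++ ks').Pairwise (· < ·) →
    (∀ x : Int, chrom.contains x = true ↔ x ∈ pre0 ++ ks') →
    (∀ b1 ∈ ks', chrom.getD b1 ([] : List (List String)) ≠ []) →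
    (∀ x : Int, x ∈ sA ↔ x ∈ prev ∨ x ∈ pre0) →
    (ks'.foldl (jseA_step chrom window) (sA, ce)).2 = jseB_chromLoop chrom prev window ks' ce := by
  intro ks'
  induction ks' with
  | nil => intro pre0 sA ce _ _ _ _; rfl
  | cons b1 rest ih =>
    intro pre0 sA ce hpw hck hne hsA
    have hsplit := (List.pairwise_append.mp hpw)
    have hb1rest := List.pairwise_cons.mp hsplit.2.1
    -- the two step results on the dictionary agree
    have hn : 1 ≤ (chrom.getD b1 ([] : List (List String))).length :=
      List.length_pos_iff.mpr (hne b1 (by simp))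
    have hpairs : jseB_scan chrom prev (b1 + window)
        (((chrom.getD b1 []).headD []).headD "") rest =
        ((((PySem.List.pyRange (b1 - window) (b1 + window) 1).filter
            (fun j => chrom.contains j && !((sA ++ [b1]).contains j))).map
            (fun j => ((chrom.getD j []).headD []).headD "")).flatMap
          (fun e => [((chrom.getD b1 []).headD []).headD "", e])) := by
      rw [jseB_scan_eq chrom prev (b1 + window) _ rest hb1rest.2,
        jse_filter_eq chrom prev window b1 pre0 rest sA hpw hck hsA, List.flatMap_map]
    -- unfold one step on each side
    rw [List.foldl_cons,
      show jseA_step chrom window (sA, ce) b1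
        = (sA ++ [b1], (jseA_step chrom window (sA, ce) b1).2) from rfl,
      show jseB_chromLoop chrom prev window (b1 :: rest) ce
        = jseB_chromLoop chrom prev window rest
            (if (jseB_scan chrom prev (b1 + window)
                  (((chrom.getD b1 []).headD []).headD "") rest).isEmpty then ce
             else ce.insert (((chrom.getD b1 []).headD []).headD "")
               (ce.getD (((chrom.getD b1 []).headD []).headD "") [] ++
                 (List.replicate (chrom.getD b1 []).length
                   (jseB_scan chrom prev (b1 + window)
                     (((chrom.getD b1 []).headD []).headD "") rest)).flatten)) from rfl]
    have hce : (jseA_step chrom window (sA, ce) b1).2 =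
        (if (jseB_scan chrom prev (b1 + window)
              (((chrom.getD b1 []).headD []).headD "") rest).isEmpty then ce
         else ce.insert (((chrom.getD b1 []).headD []).headD "")
           (ce.getD (((chrom.getD b1 []).headD []).headD "") [] ++
             (List.replicate (chrom.getD b1 []).length
               (jseB_scan chrom prev (b1 + window)
                 (((chrom.getD b1 []).headD []).headD "") rest)).flatten)) := by
      rw [jseA_step_snd, hpairs]
      simp only [jse_flatten_replicate_isEmpty _ hn]
    rw [hce]
    exact ih (pre0 ++ [b1]) (sA ++ [b1]) _
      (by simpa [List.append_assoc] using hpw)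
      (by intro x; simpa [List.append_assoc] using hck x)
      (fun k hk => hne k (by simp [hk]))
      (by intro x
          simp only [List.mem_append, List.mem_singleton, hsA x]
          tauto)


-- outer loop: fold over the sorted chromosome names, with the seen-list/prev-set invariant
theorem jse_outer (dd : PySem.Dict String (List (Int × List (List String)))) (window : Int) :
    ∀ (cs : List String) (sA : List Int) (prev : PySem.Set Int)
      (ce : PySem.Dict String (List String)),
    (∀ c ∈ cs, (PySem.Dict.mk (dd.getD c [])).keys.Nodup ∧
       ∀ k ∈ (PySem.Dict.mk (dd.getD c [])).keys,
         (PySem.Dict.mk (dd.getD c [])).getD k ([] : List (List String)) ≠ []) →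
    (∀ x : Int, x ∈ sA ↔ x ∈ prev) →
    (cs.foldl (fun st c =>
        (PySem.List.sorted (PySem.Dict.mk (dd.getD c [])).keys (fun x => x) false).foldl
          (jseA_step (PySem.Dict.mk (dd.getD c [])) window) st) (sA, ce)).2 =
    (cs.foldl (fun (st : PySem.Set Int × PySem.Dict String (List String)) c =>
        (PySem.Set.update st.1
           (PySem.List.sorted (PySem.Dict.mk (dd.getD c [])).keys (fun x => x) false),
         jseB_chromLoop (PySem.Dict.mk (dd.getD c [])) st.1 window
           (PySem.List.sorted (PySem.Dict.mk (dd.getD c [])).keys (fun x => x) false) st.2))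
      (prev, ce)).2 := by
  intro cs
  induction cs with
  | nil => intro sA prev ce _ _; rfl
  | cons c cs ih =>
    intro sA prev ce hd hinv
    have hnd : (PySem.Dict.mk (dd.getD c [])).keys.Nodup := (hd c (by simp)).1
    have hksnd : (PySem.List.sorted (PySem.Dict.mk (dd.getD c [])).keys (fun x => x) false).Nodup :=
      (PySem.List.sorted_perm _ _ _).symm.nodup hnd
    have hkspw : (PySem.List.sorted (PySem.Dict.mk (dd.getD c [])).keys (fun x => x) false).Pairwise (· < ·) :=
      jse_pairwise_lt _ (PySem.List.sorted_pairwise _ _) hksnd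
    have hck : ∀ x : Int, (PySem.Dict.mk (dd.getD c [])).contains x = true ↔
        x ∈ ([] : List Int) ++ PySem.List.sorted (PySem.Dict.mk (dd.getD c [])).keys (fun x => x) false := by
      intro x
      rw [PySem.Dict.contains_iff_mem_keys]
      simp [PySem.List.mem_sorted]
    have hne : ∀ b1 ∈ PySem.List.sorted (PySem.Dict.mk (dd.getD c [])).keys (fun x => x) false,
        (PySem.Dict.mk (dd.getD c [])).getD b1 ([] : List (List String)) ≠ [] := by
      intro b1 hb1
      exact (hd c (by simp)).2 b1 ((PySem.List.mem_sorted _ _ _ _).mp hb1)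
    have hsnd := jse_inner (PySem.Dict.mk (dd.getD c [])) window prev
      (PySem.List.sorted (PySem.Dict.mk (dd.getD c [])).keys (fun x => x) false)
      [] sA ce (by simpa using hkspw) hck hne (by intro x; simp [hinv x])
    rw [List.foldl_cons, List.foldl_cons]
    rw [show (PySem.List.sorted (PySem.Dict.mk (dd.getD c [])).keys (fun x => x) false).foldl
          (jseA_step (PySem.Dict.mk (dd.getD c [])) window) (sA, ce)
        = (((PySem.List.sorted (PySem.Dict.mk (dd.getD c [])).keys (fun x => x) false).foldl
          (jseA_step (PySem.Dict.mk (dd.getD c [])) window) (sA, ce)).1,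
          ((PySem.List.sorted (PySem.Dict.mk (dd.getD c [])).keys (fun x => x) false).foldl
          (jseA_step (PySem.Dict.mk (dd.getD c [])) window) (sA, ce)).2) from rfl,
      jseA_foldl_fst, hsnd]
    exact ih _ _ _ (fun c' hc' => hd c' (by simp [hc'])) (by
      intro x
      simp [PySem.Set.mem_update, hinv x])

-- ===== VERDICT (by name: the statement is the Claim_ definition above) =====
theorem join_same_end_spec : Claim_equal_join_same_end := by
  intro d window complex_events _ hpre
  show join_same_end d window complex_events = join_same_end_alt d window complex_events
  unfold join_same_end join_same_end_alt
  simp only []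
  congr 1
  apply jse_outer
  · intro c hc
    have hcK : c ∈ (PySem.Dict.mk d).keys := (PySem.List.mem_sorted _ _ _ _).mp hc
    obtain ⟨p, hp, hpc⟩ := List.mem_map.mp hcK
    have hget : (PySem.Dict.mk d).getD c [] = p.2 := by
      apply PySem.Dict.getD_of_mem_items
      · rw [← hpc]; exact hp
      · exact hpre.1
    rw [hget]
    refine ⟨(hpre.2.2 p hp).1, ?_⟩
    intro k hk
    obtain ⟨q, hq, hqk⟩ := List.mem_map.mp hk
    have hgq : (PySem.Dict.mk p.2).getD k ([] : List (List String)) = q.2 := by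
      apply PySem.Dict.getD_of_mem_items
      · rw [← hqk]; exact hq
      · exact (hpre.2.2 p hp).1
    rw [hgq]
    exact ((hpre.2.2 p hp).2 q hq).1
  · intro x
    simp [PySem.Set.empty]
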